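-- pv_equiv track=rewrite | github.com/yyyfnneuuu/ANN-Samples-Library | 01-codemate-agentic-rag/agentic_rag/ingestion.py | _best_symbol
-- ===== SOURCE A (Python) =====
-- from typing import Dict, Iterable, List, Sequence, Set, Tuple
--
-- def _best_symbol(symbols: Sequence[Tuple[str, int]], start_line: int, end_line: int) -> str:
--     candidate = "global_scope"
--     min_distance = 1_000_000
--     for name, line in symbols:
--         if start_line <= line <= end_line:
--             return name
--         distance = min(abs(line - start_line), abs(line - end_line))
--         if distance < min_distance:
--             min_distance = distance
--             candidate = name
--     return candidate
-- ===== SOURCE B (Python) =====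
-- # Symbols farther than this many lines from the range are too far to count as enclosing scope.
-- _MAX_DISTANCE = 1_000_000
--
--
-- def _best_symbol(symbols, start_line, end_line):
--     hit = next((name for name, line in symbols if start_line <= line <= end_line), None)
--     if hit is not None:
--         return hit
--     candidates = [("global_scope", _MAX_DISTANCE)] + [
--         (name, min(abs(line - start_line), abs(line - end_line)))
--         for name, line in symbols
--     ]
--     return min(candidates, key=lambda c: c[1])[0]
-- ===== Notes on version B (the rewrite author's own statement) =====
-- stated objective: simpler
-- what changed: Replaces the fused early-exit loop carrying (candidate, min_distance) state with two declarative passes: a next() search for an in-range symbol, then min() over a distance-keyed candidate list seeded with the default scope at the maximum distance (first-minimum tie-break).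
import Mathlib
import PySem

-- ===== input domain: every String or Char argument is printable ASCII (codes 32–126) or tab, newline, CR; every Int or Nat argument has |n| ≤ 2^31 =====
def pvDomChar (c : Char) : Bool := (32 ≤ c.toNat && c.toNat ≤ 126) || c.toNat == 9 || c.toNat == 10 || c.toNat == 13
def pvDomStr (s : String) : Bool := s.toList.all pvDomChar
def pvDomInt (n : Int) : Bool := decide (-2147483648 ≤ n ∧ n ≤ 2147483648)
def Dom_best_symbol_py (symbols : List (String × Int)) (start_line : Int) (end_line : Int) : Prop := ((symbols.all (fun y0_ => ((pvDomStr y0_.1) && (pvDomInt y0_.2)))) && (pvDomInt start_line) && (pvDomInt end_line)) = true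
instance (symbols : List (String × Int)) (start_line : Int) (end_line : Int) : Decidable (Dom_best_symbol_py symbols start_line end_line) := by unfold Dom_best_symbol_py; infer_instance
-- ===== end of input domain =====

-- B replaces A's fused early-exit loop carrying (candidate, min_distance) state with two
-- declarative passes: a find for an in-range symbol, then min() over a distance-keyed
-- candidate list seeded with the default scope; same result, same O(n) cost.

-- ===== PORT A =====
-- the for-loop of A, carrying (candidate, min_distance)
def bestGoA (start_line end_line : Int) : List (String × Int) → String → Int → String
  | [], candidate, _ => candidate
  | (name, line) :: rest, candidate, min_distance =>
    if start_line ≤ line ∧ line ≤ end_line then name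
    else
      let distance := min |line - start_line| |line - end_line|
      if distance < min_distance then bestGoA start_line end_line rest name distance
      else bestGoA start_line end_line rest candidate min_distance

def best_symbol_py (symbols : List (String × Int)) (start_line : Int) (end_line : Int) : String :=
  bestGoA start_line end_line symbols "global_scope" 1000000

-- ===== PORT B =====
def best_symbol_py_alt (symbols : List (String × Int)) (start_line : Int) (end_line : Int) : String :=
  -- hit = next((name for name, line in symbols if start_line <= line <= end_line), None)
  match symbols.find? (fun y => decide (start_line ≤ y.2 ∧ y.2 ≤ end_line)) with
  | some hit => hit.1
  | none =>
    -- candidates = [("global_scope", _MAX_DISTANCE)] + [(name, dist) ...]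
    let candidates : List (String × Int) :=
      ("global_scope", 1000000) ::
        symbols.map (fun y => (y.1, min |y.2 - start_line| |y.2 - end_line|))
    -- min(candidates, key=lambda c: c[1])[0]  (candidates is nonempty, so min? is some)
    match PySem.List.min? candidates (fun c => c.2) with
    | some best => best.1
    | none => "global_scope"

-- ===== PRECONDITION & SPEC =====
def Spec_best_symbol_py (symbols : List (String × Int)) (start_line : Int) (end_line : Int) (out : String) : Prop := out = best_symbol_py_alt symbols start_line end_line
instance (symbols : List (String × Int)) (start_line : Int) (end_line : Int) (out : String) : Decidable (Spec_best_symbol_py symbols start_line end_line out) := by unfold Spec_best_symbol_py; infer_instance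

-- ===== CLAIM (what is proved, stated in full; the proofs are below) =====
def Claim_equal_best_symbol_py : Prop := ∀ (symbols : List (String × Int)) (start_line : Int) (end_line : Int), Dom_best_symbol_py symbols start_line end_line → Spec_best_symbol_py symbols start_line end_line (best_symbol_py symbols start_line end_line)

-- ===== LEMMAS AND PROOFS =====

-- the distance-keyed image of the symbol list
def mB (s e : Int) (l : List (String × Int)) : List (String × Int) :=
  l.map (fun y => (y.1, min |y.2 - s| |y.2 - e|))

-- running first-minimum (on the second component) over pairs
def gStep (a y : String × Int) : String × Int := if y.2 < a.2 then y else a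

-- the internal step of PySem.List.min?, specialised to the key Prod.snd
def fOpt (acc : Option (String × Int)) (y : String × Int) : Option (String × Int) :=
  match acc with
  | none => some y
  | some m => if y.2 < m.2 then some y else some m

lemma fOpt_foldl : ∀ (t : List (String × Int)) (x : String × Int),
    List.foldl fOpt (some x) t = some (t.foldl gStep x) := by
  intro t
  induction t with
  | nil => intro x; rfl
  | cons z t' ih =>
    intro x
    have h1 : List.foldl fOpt (some x) (z :: t') = List.foldl fOpt (fOpt (some x) z) t' := rfl
    have h2 : fOpt (some x) z = some (gStep x z) := by
      simp only [fOpt, gStep]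
      split <;> rfl
    rw [h1, h2, ih]
    rfl

lemma min?_cons_fold (x : String × Int) (t : List (String × Int)) :
    PySem.List.min? (x :: t) (fun c : String × Int => c.2) = some (t.foldl gStep x) := by
  have h : PySem.List.min? (x :: t) (fun c : String × Int => c.2)
      = List.foldl fOpt (some x) t := by
    simp only [PySem.List.min?, List.foldl_cons]
    congr 1
    · funext a y
      cases a <;> rfl
  rw [h, fOpt_foldl]

-- A's loop computes the first-minimum fold over the distance-keyed list
lemma goA_eq (s e : Int) : ∀ (l : List (String × Int)) (cand : String) (md : Int),
    bestGoA s e l cand md =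
      match l.find? (fun y => decide (s ≤ y.2 ∧ y.2 ≤ e)) with
      | some hit => hit.1
      | none => ((mB s e l).foldl gStep (cand, md)).1 := by
  intro l
  induction l with
  | nil => intro cand md; rfl
  | cons hd t ih =>
    intro cand md
    obtain ⟨n, li⟩ := hd
    have hred : bestGoA s e ((n, li) :: t) cand md =
        if s ≤ li ∧ li ≤ e then n
        else if min |li - s| |li - e| < md then bestGoA s e t n (min |li - s| |li - e|)
        else bestGoA s e t cand md := rfl
    rw [hred]
    by_cases hp : s ≤ li ∧ li ≤ e
    · rw [if_pos hp]
      have hfind : List.find? (fun y => decide (s ≤ y.2 ∧ y.2 ≤ e)) ((n, li) :: t) = some (n, li) :=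
        List.find?_cons_of_pos (by simpa using hp)
      rw [hfind]
    · rw [if_neg hp]
      have hfind : List.find? (fun y => decide (s ≤ y.2 ∧ y.2 ≤ e)) ((n, li) :: t)
          = List.find? (fun y => decide (s ≤ y.2 ∧ y.2 ≤ e)) t :=
        List.find?_cons_of_neg (by simpa using hp)
      rw [hfind]
      have hfold : (mB s e ((n, li) :: t)).foldl gStep (cand, md)
          = (mB s e t).foldl gStep (gStep (cand, md) (n, min |li - s| |li - e|)) := rfl
      by_cases hlt : min |li - s| |li - e| < md
      · rw [if_pos hlt, ih]
        cases hf : List.find? (fun y => decide (s ≤ y.2 ∧ y.2 ≤ e)) t with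
        | some hit => rfl
        | none =>
          show ((mB s e t).foldl gStep (n, min |li - s| |li - e|)).1
              = ((mB s e ((n, li) :: t)).foldl gStep (cand, md)).1
          rw [hfold]
          have : gStep (cand, md) (n, min |li - s| |li - e|) = (n, min |li - s| |li - e|) := by
            simp only [gStep, if_pos hlt]
          rw [this]
      · rw [if_neg hlt, ih]
        cases hf : List.find? (fun y => decide (s ≤ y.2 ∧ y.2 ≤ e)) t with
        | some hit => rfl
        | none =>
          show ((mB s e t).foldl gStep (cand, md)).1
              = ((mB s e ((n, li) :: t)).foldl gStep (cand, md)).1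
          rw [hfold]
          have : gStep (cand, md) (n, min |li - s| |li - e|) = (cand, md) := by
            simp only [gStep, if_neg hlt]
          rw [this]

-- ===== VERDICT (by name: the statement is the Claim_ definition above) =====
theorem best_symbol_py_spec : Claim_equal_best_symbol_py := by
  intro symbols s e _
  unfold Spec_best_symbol_py best_symbol_py best_symbol_py_alt
  rw [goA_eq]
  cases hf : List.find? (fun y => decide (s ≤ y.2 ∧ y.2 ≤ e)) symbols with
  | some hit => rfl
  | none =>
    show ((mB s e symbols).foldl gStep ("global_scope", 1000000)).1 =
      match PySem.List.min?
          (("global_scope", (1000000 : Int)) :: symbols.map (fun y => (y.1, min |y.2 - s| |y.2 - e|)))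
          (fun c : String × Int => c.2) with
      | some best => best.1
      | none => "global_scope"
    rw [min?_cons_fold]
    rfl
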